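-- pv_equiv track=rewrite | github.com/salarrobot/basketball-system-analysis | pass_and_interception_detector/pass_and_interception_detector.py | detectInterceptions
-- ===== SOURCE A (Python) =====
-- from typing import Dict, List, Sequence
--
-- AssignmentFrame = Dict[int, int]
--
-- def detectInterceptions(
--
--     ballAcquisition: Sequence[int],
--     playerAssignment: Sequence[AssignmentFrame],
-- ) -> List[int]:
--     interceptions = [-1] * len(ballAcquisition)
--     prevHolder = -1
--     prevFrame = -1
--     for idx in range(1, len(ballAcquisition)):
--         if ballAcquisition[idx - 1] != -1:
--             prevHolder = ballAcquisition[idx - 1]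
--             prevFrame = idx - 1
--         currHolder = ballAcquisition[idx]
--         if prevHolder != -1 and currHolder != -1 and prevHolder != currHolder:
--             prevTeam = playerAssignment[prevFrame].get(prevHolder, -1)
--             currTeam = playerAssignment[idx].get(currHolder, -1)
--             if prevTeam != currTeam and prevTeam != -1 and currTeam != -1:
--                 interceptions[idx] = currTeam
--     return interceptions
-- ===== SOURCE B (Python) =====
-- def detectInterceptions(ballAcquisition, playerAssignment):
--     interceptions = [-1] * len(ballAcquisition)
--     events = [(f, h) for f, h in enumerate(ballAcquisition) if h != -1]
--     for (pf, ph), (cf, ch) in zip(events, events[1:]):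
--         if ph != ch:
--             prevTeam = playerAssignment[pf].get(ph, -1)
--             currTeam = playerAssignment[cf].get(ch, -1)
--             if prevTeam != currTeam and prevTeam != -1 and currTeam != -1:
--                 interceptions[cf] = currTeam
--     return interceptions
-- ===== Notes on version B (the rewrite author's own statement) =====
-- stated objective: alternative
-- what changed: B replaces A's frame-by-frame scan that threads prevHolder/prevFrame state through every frame with an event-list decomposition: it filters the non -1 acquisition events once and processes only consecutive event pairs via zip(events, events[1:]).
import Mathlib
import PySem

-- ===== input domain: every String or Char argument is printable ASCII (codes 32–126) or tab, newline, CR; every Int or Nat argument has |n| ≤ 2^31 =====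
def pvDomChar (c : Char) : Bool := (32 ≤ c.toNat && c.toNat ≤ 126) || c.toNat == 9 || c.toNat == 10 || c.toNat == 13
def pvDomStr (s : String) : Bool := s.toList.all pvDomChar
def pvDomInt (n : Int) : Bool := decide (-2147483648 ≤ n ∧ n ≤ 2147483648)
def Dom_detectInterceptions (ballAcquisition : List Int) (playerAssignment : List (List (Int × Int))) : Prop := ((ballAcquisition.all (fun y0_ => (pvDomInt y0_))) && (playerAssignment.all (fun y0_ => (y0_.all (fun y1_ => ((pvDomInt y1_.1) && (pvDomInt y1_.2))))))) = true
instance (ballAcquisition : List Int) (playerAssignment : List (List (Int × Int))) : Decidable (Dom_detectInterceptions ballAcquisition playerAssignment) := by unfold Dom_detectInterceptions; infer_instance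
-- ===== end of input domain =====

-- B replaces A's frame-by-frame scan carrying prevHolder/prevFrame state with an event-list
-- decomposition (filter the non -1 events once, then walk consecutive event pairs); same cost.

-- ===== PORT A =====
-- d.get(k, dflt) on the association-list encoding of a Python dict (first match wins)
def assocGetD (d : List (Int × Int)) (k dflt : Int) : Int :=
  match d.find? (fun p => p.1 == k) with
  | some p => p.2
  | none => dflt

-- one iteration of A's 'for idx in range(1, len(ballAcquisition))' loop; state = (interceptions, prevHolder, prevFrame)
def stepA (b : List Int) (pa : List (List (Int × Int))) (st : List Int × Int × Int) (idx : Int) : List Int × Int × Int :=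
  let ints := st.1
  let ph := if PySem.List.pyGetD b (idx - 1) 0 ≠ -1 then PySem.List.pyGetD b (idx - 1) 0 else st.2.1
  let pf := if PySem.List.pyGetD b (idx - 1) 0 ≠ -1 then idx - 1 else st.2.2
  let currHolder := PySem.List.pyGetD b idx 0
  if ph ≠ -1 ∧ currHolder ≠ -1 ∧ ph ≠ currHolder then
    let prevTeam := assocGetD (PySem.List.pyGetD pa pf []) ph (-1)
    let currTeam := assocGetD (PySem.List.pyGetD pa idx []) currHolder (-1)
    if prevTeam ≠ currTeam ∧ prevTeam ≠ -1 ∧ currTeam ≠ -1 then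
      (PySem.List.pySetD ints idx currTeam, ph, pf)
    else (ints, ph, pf)
  else (ints, ph, pf)

def detectInterceptions (ballAcquisition : List Int) (playerAssignment : List (List (Int × Int))) : List Int :=
  ((PySem.List.pyRange 1 (ballAcquisition.length : Int) 1).foldl
    (stepA ballAcquisition playerAssignment)
    (List.replicate ballAcquisition.length (-1), -1, -1)).1

-- ===== PORT B =====
-- events = [(f, h) for f, h in enumerate(ballAcquisition) if h != -1]
def evts (b : List Int) : List (Int × Int) :=
  (PySem.List.enumerate b).filter (fun e => e.2 ≠ -1)

-- body of B's loop over zip(events, events[1:])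
def stepB (pa : List (List (Int × Int))) (ints : List Int) (pr : (Int × Int) × (Int × Int)) : List Int :=
  let pf := pr.1.1; let ph := pr.1.2; let cf := pr.2.1; let ch := pr.2.2
  if ph ≠ ch then
    let prevTeam := assocGetD (PySem.List.pyGetD pa pf []) ph (-1)
    let currTeam := assocGetD (PySem.List.pyGetD pa cf []) ch (-1)
    if prevTeam ≠ currTeam ∧ prevTeam ≠ -1 ∧ currTeam ≠ -1 then
      PySem.List.pySetD ints cf currTeam
    else ints
  else ints

def detectInterceptions_alt (ballAcquisition : List Int) (playerAssignment : List (List (Int × Int))) : List Int :=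
  let events := evts ballAcquisition
  (events.zip events.tail).foldl (stepB playerAssignment)
    (List.replicate ballAcquisition.length (-1))

-- ===== PRECONDITION & SPEC =====
-- Pre_ excludes exactly the inputs on which Python A raises IndexError: A looks up
-- playerAssignment[prevFrame] and playerAssignment[idx] whenever two consecutive acquisition
-- events (non -1 holders with only -1 frames between them) have different holders, so both those
-- frames must be inside playerAssignment; on every other input A returns normally.
def Pre_detectInterceptions (ballAcquisition : List Int) (playerAssignment : List (List (Int × Int))) : Prop :=
  ∀ i ∈ List.range ballAcquisition.length, ∀ j ∈ List.range ballAcquisition.length, i < j →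
    ballAcquisition.getD i (-1) ≠ -1 → ballAcquisition.getD j (-1) ≠ -1 →
    ballAcquisition.getD i (-1) ≠ ballAcquisition.getD j (-1) →
    (∀ k ∈ List.range j, i < k → ballAcquisition.getD k (-1) = -1) →
    (i < playerAssignment.length ∧ j < playerAssignment.length)
instance (ballAcquisition : List Int) (playerAssignment : List (List (Int × Int))) : Decidable (Pre_detectInterceptions ballAcquisition playerAssignment) := by unfold Pre_detectInterceptions; infer_instance

def pvWitness_detectInterceptions : List Int × (List (List (Int × Int))) :=
  ([1, -1, 2, 2, -1, 3], [[(1, 0)], [], [(2, 1)], [(2, 1)], [], [(3, 0)]])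

def Spec_detectInterceptions (ballAcquisition : List Int) (playerAssignment : List (List (Int × Int))) (out : List Int) : Prop := out = detectInterceptions_alt ballAcquisition playerAssignment
instance (ballAcquisition : List Int) (playerAssignment : List (List (Int × Int))) (out : List Int) : Decidable (Spec_detectInterceptions ballAcquisition playerAssignment out) := by unfold Spec_detectInterceptions; infer_instance

-- ===== CLAIM (what is proved, stated in full; the proofs are below) =====
def Claim_equal_detectInterceptions : Prop := ∀ (ballAcquisition : List Int) (playerAssignment : List (List (Int × Int))), Dom_detectInterceptions ballAcquisition playerAssignment → Pre_detectInterceptions ballAcquisition playerAssignment → Spec_detectInterceptions ballAcquisition playerAssignment (detectInterceptions ballAcquisition playerAssignment)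

-- ===== LEMMAS AND PROOFS =====

-- (prevHolder, prevFrame) that A's loop carries after having consumed frames < k
def lastEv (b : List Int) : Nat → Int × Int
  | 0 => (-1, -1)
  | (k+1) => if b.getD k 0 ≠ -1 then (b.getD k 0, (k : Int)) else lastEv b k

theorem lastEv_append (b : List Int) (x : Int) :
    ∀ k, k ≤ b.length → lastEv (b ++ [x]) k = lastEv b k := by
  intro k
  induction k with
  | zero => intro _; rfl
  | succ k ih =>
    intro hk
    simp only [lastEv, List.getD_append _ _ _ _ (by omega : k < b.length), ih (by omega)]

theorem enumerate_append_singleton (b : List Int) (x : Int) :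
    ∀ s : Int, PySem.List.enumerate (b ++ [x]) s = PySem.List.enumerate b s ++ [(s + b.length, x)] := by
  induction b with
  | nil => intro s; simp [PySem.List.enumerate_cons, PySem.List.enumerate_nil]
  | cons y ys ih =>
    intro s
    simp only [List.cons_append, PySem.List.enumerate_cons, ih (s + 1), List.length_cons]
    rw [show s + 1 + (ys.length : Int) = s + ((1 + ys.length : Nat) : Int) by push_cast; ring,
      Nat.add_comm 1 ys.length]

theorem evts_append (b : List Int) (x : Int) :
    evts (b ++ [x]) = evts b ++ (if x ≠ -1 then [((b.length : Int), x)] else []) := by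
  unfold evts
  rw [enumerate_append_singleton b x 0, List.filter_append]
  by_cases hx : x = -1 <;> simp [hx]

theorem zip_tail_append (e : Int × Int) :
    ∀ l : List (Int × Int),
      (l ++ [e]).zip (l ++ [e]).tail
        = l.zip l.tail ++ (l.getLast?.map (fun a => (a, e))).toList := by
  intro l
  induction l with
  | nil => simp
  | cons a t ih =>
    cases t with
    | nil => simp
    | cons a' t' =>
      simp only [List.cons_append, List.tail_cons, List.zip_cons_cons] at *
      rw [ih]
      simp [List.getLast?_cons_cons]

theorem stepA_length (b : List Int) (pa : List (List (Int × Int))) (st : List Int × Int × Int) (i : Int) :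
    (stepA b pa st i).1.length = st.1.length := by
  unfold stepA
  dsimp only
  split_ifs <;> simp [PySem.List.length_pySetD]

theorem stepB_length (pa : List (List (Int × Int))) (ints : List Int) (pr : (Int × Int) × (Int × Int)) :
    (stepB pa ints pr).length = ints.length := by
  unfold stepB
  dsimp only
  split_ifs <;> simp [PySem.List.length_pySetD]

theorem foldB_length (pa : List (List (Int × Int))) :
    ∀ (ps : List ((Int × Int) × (Int × Int))) (ints : List Int),
      (ps.foldl (stepB pa) ints).length = ints.length := by
  intro ps
  induction ps with
  | nil => intro ints; rfl
  | cons p t ih => intro ints; rw [List.foldl_cons, ih, stepB_length]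

-- a stepA over frames < b.length ignores a trailing extra cell and the appended frame
theorem stepA_append (b : List Int) (x : Int) (pa : List (List (Int × Int)))
    (ints : List Int) (c : Int) (s : Int × Int) (i : Int)
    (h1 : 1 ≤ i) (h2 : i < (b.length : Int)) (hlen : ints.length = b.length) :
    stepA (b ++ [x]) pa (ints ++ [c], s) i
      = ((stepA b pa (ints, s) i).1 ++ [c], (stepA b pa (ints, s) i).2) := by
  have hi1 : PySem.List.pyGetD (b ++ [x]) (i - 1) 0 = PySem.List.pyGetD b (i - 1) 0 := by
    rw [PySem.List.pyGetD_of_nonneg _ _ (by omega), PySem.List.pyGetD_of_nonneg _ _ (by omega),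
      List.getD_append _ _ _ _ (by omega : (i - 1).toNat < b.length)]
  have hi2 : PySem.List.pyGetD (b ++ [x]) i 0 = PySem.List.pyGetD b i 0 := by
    rw [PySem.List.pyGetD_of_nonneg _ _ (by omega), PySem.List.pyGetD_of_nonneg _ _ (by omega),
      List.getD_append _ _ _ _ (by omega : i.toNat < b.length)]
  have hset : ∀ v : Int, PySem.List.pySetD (ints ++ [c]) i v = PySem.List.pySetD ints i v ++ [c] := by
    intro v
    rw [PySem.List.pySetD_of_nonneg _ _ (by omega), PySem.List.pySetD_of_nonneg _ _ (by omega),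
      List.set_append_left _ _ (by omega : i.toNat < ints.length)]
  unfold stepA
  simp only [hi1, hi2]
  split_ifs <;> simp [hset]

theorem foldA_append (b : List Int) (x : Int) (pa : List (List (Int × Int))) :
    ∀ (L : List Int), (∀ i ∈ L, 1 ≤ i ∧ i < (b.length : Int)) →
      ∀ (ints : List Int) (c : Int) (s : Int × Int), ints.length = b.length →
        L.foldl (stepA (b ++ [x]) pa) (ints ++ [c], s)
          = ((L.foldl (stepA b pa) (ints, s)).1 ++ [c], (L.foldl (stepA b pa) (ints, s)).2) := by
  intro L
  induction L with
  | nil => intro _ ints c s _; rfl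
  | cons i t ih =>
    intro hmem ints c s hlen
    obtain ⟨h1, h2⟩ := hmem i (by simp)
    rw [List.foldl_cons, List.foldl_cons, stepA_append b x pa ints c s i h1 h2 hlen]
    have := ih (fun j hj => hmem j (by simp [hj])) (stepA b pa (ints, s) i).1 c
      (stepA b pa (ints, s) i).2 (by rw [stepA_length]; exact hlen)
    simpa using this

theorem stepB_append (pa : List (List (Int × Int))) (ints : List Int) (c : Int)
    (pr : (Int × Int) × (Int × Int)) (h0 : 0 ≤ pr.2.1) (h2 : pr.2.1 < (ints.length : Int)) :
    stepB pa (ints ++ [c]) pr = stepB pa ints pr ++ [c] := by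
  have hset : ∀ v : Int, PySem.List.pySetD (ints ++ [c]) pr.2.1 v = PySem.List.pySetD ints pr.2.1 v ++ [c] := by
    intro v
    rw [PySem.List.pySetD_of_nonneg _ _ h0, PySem.List.pySetD_of_nonneg _ _ h0,
      List.set_append_left _ _ (by omega : (pr.2.1).toNat < ints.length)]
  unfold stepB
  dsimp only
  split_ifs <;> simp [hset]

theorem foldB_append (pa : List (List (Int × Int))) (n : Nat) :
    ∀ (ps : List ((Int × Int) × (Int × Int))), (∀ p ∈ ps, 0 ≤ p.2.1 ∧ p.2.1 < (n : Int)) →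
      ∀ (ints : List Int) (c : Int), ints.length = n →
        ps.foldl (stepB pa) (ints ++ [c]) = ps.foldl (stepB pa) ints ++ [c] := by
  intro ps
  induction ps with
  | nil => intro _ ints c _; rfl
  | cons p t ih =>
    intro hmem ints c hlen
    obtain ⟨h0, h2⟩ := hmem p (by simp)
    rw [List.foldl_cons, List.foldl_cons, stepB_append pa ints c p h0 (by rw [hlen]; exact h2),
      ih (fun q hq => hmem q (by simp [hq])) _ c (by rw [stepB_length]; exact hlen)]

theorem set_concat_length (l : List Int) (c v : Int) : (l ++ [c]).set l.length v = l ++ [v] := by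
  induction l with
  | nil => rfl
  | cons a t ih => simp [ih]

-- the master invariant: A's fold equals (B's output, lastEv state); plus the event-list facts B needs
theorem main_invariant (pa : List (List (Int × Int))) (b : List Int) :
    ((PySem.List.pyRange 1 (b.length : Int) 1).foldl (stepA b pa)
        (List.replicate b.length (-1), (-1 : Int), (-1 : Int))
      = (detectInterceptions_alt b pa, lastEv b (b.length - 1)))
    ∧ (∀ e ∈ evts b, 0 ≤ e.1 ∧ e.1 < (b.length : Int) ∧ e.2 ≠ -1)
    ∧ (lastEv b b.length
        = match (evts b).getLast? with
          | some e => (e.2, e.1)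
          | none => (-1, -1)) := by
  induction b using List.reverseRecOn with
  | nil =>
    refine ⟨?_, ?_, ?_⟩
    · rw [show (((List.nil : List Int)).length : Int) = 0 by simp,
        PySem.List.pyRange_one_eq_nil (by norm_num : (0 : Int) ≤ 1)]
      simp [detectInterceptions_alt, evts, PySem.List.enumerate_nil, lastEv]
    · intro e he; simp [evts, PySem.List.enumerate_nil] at he
    · simp [evts, PySem.List.enumerate_nil, lastEv]
  | append_singleton b x ih =>
    obtain ⟨ihA, ihF, ihL⟩ := ih
    have hevts := evts_append b x
    have hlenalt : (detectInterceptions_alt b pa).length = b.length := by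
      unfold detectInterceptions_alt
      rw [foldB_length]; simp
    have hgetx : (b ++ [x]).getD b.length 0 = x := by
      simp [List.getD_eq_getElem?_getD]
    -- frames fact for b ++ [x]
    have hF' : ∀ e ∈ evts (b ++ [x]), 0 ≤ e.1 ∧ e.1 < ((b ++ [x]).length : Int) ∧ e.2 ≠ -1 := by
      intro e he
      rw [hevts] at he
      rcases List.mem_append.1 he with h | h
      · obtain ⟨u1, u2, u3⟩ := ihF e h
        refine ⟨u1, by simp; omega, u3⟩
      · by_cases hx : x = -1
        · simp [hx] at h
        · simp [hx] at h
          subst h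
          refine ⟨by positivity, by simp, hx⟩
    -- lastEv fact for b ++ [x]
    have hL' : lastEv (b ++ [x]) (b ++ [x]).length
        = match (evts (b ++ [x])).getLast? with
          | some e => (e.2, e.1)
          | none => (-1, -1) := by
      simp only [List.length_append, List.length_cons, List.length_nil]
      show lastEv (b ++ [x]) (b.length + 1) = _
      by_cases hx : x = -1
      · rw [show lastEv (b ++ [x]) (b.length + 1)
            = if (b ++ [x]).getD b.length 0 ≠ -1 then ((b ++ [x]).getD b.length 0, (b.length : Int))
              else lastEv (b ++ [x]) b.length from rfl]
        rw [hgetx, if_neg (by simp [hx]), lastEv_append b x b.length (le_refl _), hevts]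
        simp [hx, ihL]
      · rw [show lastEv (b ++ [x]) (b.length + 1)
            = if (b ++ [x]).getD b.length 0 ≠ -1 then ((b ++ [x]).getD b.length 0, (b.length : Int))
              else lastEv (b ++ [x]) b.length from rfl]
        rw [hgetx, if_pos (by simpa using hx), hevts]
        simp [hx]
    refine ⟨?_, hF', hL'⟩
    -- the fold equation
    by_cases hn : b.length = 0
    · -- b = []
      have hb : b = [] := List.length_eq_zero_iff.1 hn
      subst hb
      simp only [List.nil_append]
      rw [show (([x] : List Int).length : Int) = 1 by simp,
        PySem.List.pyRange_one_eq_nil (by norm_num)]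
      simp only [List.foldl_nil]
      unfold detectInterceptions_alt
      have hx1 : evts [x] = if x ≠ -1 then [((0 : Int), x)] else [] := by
        have := evts_append [] x
        simpa [evts, PySem.List.enumerate_nil] using this
      rw [hx1]
      by_cases hx : x = -1 <;> simp [hx, lastEv]
    · -- b.length ≥ 1
      have hn1 : 1 ≤ (b.length : Int) := by exact_mod_cast Nat.one_le_iff_ne_zero.2 hn
      have hrange : PySem.List.pyRange 1 ((b ++ [x]).length : Int) 1
          = PySem.List.pyRange 1 (b.length : Int) 1 ++ [(b.length : Int)] := by
        rw [show ((b ++ [x]).length : Int) = (b.length : Int) + 1 by simp,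
          PySem.List.pyRange_one_succ_right hn1]
      have hrep : List.replicate (b ++ [x]).length (-1 : Int)
          = List.replicate b.length (-1) ++ [-1] := by
        simp [List.replicate_succ']
      have hread1 : PySem.List.pyGetD (b ++ [x]) ((b.length : Int) - 1) 0 = b.getD (b.length - 1) 0 := by
        rw [PySem.List.pyGetD_of_nonneg _ _ (by omega),
          List.getD_append _ _ _ _ (by omega : ((b.length : Int) - 1).toNat < b.length)]
        congr 1
        omega
      have hread2 : PySem.List.pyGetD (b ++ [x]) (b.length : Int) 0 = x := by
        rw [PySem.List.pyGetD_of_nonneg _ _ (by positivity)]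
        simpa using hgetx
      have hev : lastEv b b.length
          = if b.getD (b.length - 1) 0 ≠ -1 then (b.getD (b.length - 1) 0, (b.length : Int) - 1)
            else lastEv b (b.length - 1) := by
        conv_lhs => rw [show b.length = (b.length - 1) + 1 by omega]
        rw [show lastEv b ((b.length - 1) + 1)
            = if b.getD (b.length - 1) 0 ≠ -1 then (b.getD (b.length - 1) 0, ((b.length - 1 : Nat) : Int))
              else lastEv b (b.length - 1) from rfl,
          show ((b.length - 1 : Nat) : Int) = (b.length : Int) - 1 by omega]
      have hlast' : lastEv (b ++ [x]) ((b ++ [x]).length - 1) = lastEv b b.length := by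
        rw [show (b ++ [x]).length - 1 = b.length by simp, lastEv_append b x b.length (le_refl _)]
      have hsetn : ∀ (l : List Int) (v : Int), l.length = b.length →
          PySem.List.pySetD (l ++ [-1]) (b.length : Int) v = l ++ [v] := by
        intro l v hl
        rw [PySem.List.pySetD_of_nonneg _ _ (by positivity),
          show ((b.length : Int)).toNat = l.length by omega, set_concat_length]
      have haltpref : ∀ ps : List ((Int × Int) × (Int × Int)),
          (∀ p ∈ ps, 0 ≤ p.2.1 ∧ p.2.1 < ((b.length : Nat) : Int)) →
          ps.foldl (stepB pa) (List.replicate b.length (-1) ++ [-1])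
            = ps.foldl (stepB pa) (List.replicate b.length (-1)) ++ [-1] :=
        fun ps hps => foldB_append pa b.length ps hps _ _ (by simp)
      have hpairsb : ∀ p ∈ (evts b).zip (evts b).tail, 0 ≤ p.2.1 ∧ p.2.1 < ((b.length : Nat) : Int) := by
        intro p hp
        have hmem : p.2 ∈ evts b := List.mem_of_mem_tail (List.of_mem_zip hp).2
        obtain ⟨u1, u2, _⟩ := ihF p.2 hmem
        exact ⟨u1, u2⟩
      have hb1 : ∀ i ∈ PySem.List.pyRange 1 (b.length : Int) 1, 1 ≤ i ∧ i < ((b.length : Nat) : Int) :=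
        fun i hi => PySem.List.mem_pyRange_one.1 hi
      have hflen : (List.foldl (stepB pa) (List.replicate b.length (-1))
          ((evts b).zip (evts b).tail)).length = b.length := by
        rw [foldB_length]; simp
      rw [hrange, hrep, List.foldl_append,
        foldA_append b x pa _ hb1 _ _ _ (by simp), ihA]
      simp only [List.foldl_cons, List.foldl_nil]
      unfold stepA detectInterceptions_alt
      dsimp only
      simp only [hread1, hread2]
      have hph : (if b.getD (b.length - 1) 0 ≠ -1 then b.getD (b.length - 1) 0
          else (lastEv b (b.length - 1)).1) = (lastEv b b.length).1 := by
        rw [hev]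
        by_cases hc : b.getD (b.length - 1) 0 = -1
        · rw [if_neg (fun h => h hc), if_neg (fun h => h hc)]
        · rw [if_pos hc, if_pos hc]
      have hpf : (if b.getD (b.length - 1) 0 ≠ -1 then (b.length : Int) - 1
          else (lastEv b (b.length - 1)).2) = (lastEv b b.length).2 := by
        rw [hev]
        by_cases hc : b.getD (b.length - 1) 0 = -1
        · rw [if_neg (fun h => h hc), if_neg (fun h => h hc)]
        · rw [if_pos hc, if_pos hc]
      rw [hph, hpf, hlast', hevts, hrep]
      by_cases hx : x = -1
      · -- no new event: evts unchanged, A writes nothing (currHolder = -1)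
        rw [if_neg (by simp [hx] : ¬ x ≠ -1), List.append_nil, haltpref _ hpairsb,
          if_neg (by simp [hx] :
            ¬((lastEv b b.length).1 ≠ -1 ∧ x ≠ -1 ∧ (lastEv b b.length).1 ≠ x))]
      · -- new event (b.length, x)
        rw [if_pos hx, zip_tail_append, List.foldl_append, haltpref _ hpairsb]
        rcases hgl : (evts b).getLast? with _ | e
        · -- no previous event at all: lastEv = (-1, -1), neither side writes
          have hlev : lastEv b b.length = (-1, -1) := by rw [ihL, hgl]
          rw [if_neg (by simp [hlev])]
          simp
        · -- previous event e = (frame, holder)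
          have hlev : lastEv b b.length = (e.2, e.1) := by rw [ihL, hgl]
          obtain ⟨he0, helt, heh⟩ := ihF e (List.mem_of_getLast? hgl)
          simp only [Option.map_some, Option.toList_some, List.foldl_cons, List.foldl_nil]
          unfold stepB
          dsimp only
          rw [hlev]
          dsimp only
          by_cases hph2 : e.2 = x
          · rw [if_neg (by simp [hph2]), if_neg (by simp [hph2])]
          · rw [if_pos ⟨heh, hx, hph2⟩, if_pos hph2]
            split_ifs with ht
            · rw [hsetn _ _ (by exact hflen)]
            · rfl

-- ===== VERDICT (by name: the statement is the Claim_ definition above) =====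
theorem detectInterceptions_spec : Claim_equal_detectInterceptions := by
  intro b pa _ _
  unfold Spec_detectInterceptions detectInterceptions
  rw [(main_invariant pa b).1]
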